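-- pv_equiv track=rewrite | github.com/BonkingoDaniel006/option-A-Gestionnaire-de-Mots-de-Passe-S-curis-s | serv.py | detecter_doublons
-- ===== SOURCE A (Python) =====
-- def detecter_doublons(comptes):
--     groupes_mdp = {}
--     for c in comptes:
--         mdp = c['mdp']
--         if mdp in groupes_mdp:
--             groupes_mdp[mdp].append(c['site'])
--         else:
--             groupes_mdp[mdp] = [c['site']]
--
--     doublons = {mdp: sites for mdp, sites in groupes_mdp.items() if len(sites) > 1}
--     return doublons
-- ===== SOURCE B (Python) =====
-- def detecter_doublons(comptes):
--     # Pass 1: count occurrences of each password.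
--     counts = {}
--     for c in comptes:
--         counts[c['mdp']] = counts.get(c['mdp'], 0) + 1
--     # Pass 2: collect sites only for passwords that occur more than once.
--     doublons = {}
--     for c in comptes:
--         mdp = c['mdp']
--         if counts[mdp] > 1:
--             doublons.setdefault(mdp, []).append(c['site'])
--     return doublons
-- ===== Notes on version B (the rewrite author's own statement) =====
-- stated objective: alternative
-- what changed: Instead of building the full password->sites grouping (including singleton groups) and then filtering it by group length, B first counts password multiplicities in one pass and then builds only the duplicate groups directly in a second pass, never materializing singleton groups.
import Mathlib
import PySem

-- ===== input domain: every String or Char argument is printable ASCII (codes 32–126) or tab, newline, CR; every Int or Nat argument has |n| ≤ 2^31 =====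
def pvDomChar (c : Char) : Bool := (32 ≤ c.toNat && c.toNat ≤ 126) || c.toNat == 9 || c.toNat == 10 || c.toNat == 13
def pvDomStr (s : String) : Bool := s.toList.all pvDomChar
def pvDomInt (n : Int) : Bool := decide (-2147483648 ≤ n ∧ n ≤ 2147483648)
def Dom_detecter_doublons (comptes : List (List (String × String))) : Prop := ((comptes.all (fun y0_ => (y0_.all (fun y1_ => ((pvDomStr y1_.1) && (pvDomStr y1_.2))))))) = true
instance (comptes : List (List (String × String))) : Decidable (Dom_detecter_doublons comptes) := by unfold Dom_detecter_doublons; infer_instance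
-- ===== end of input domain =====

-- B replaces A's build-all-groups-then-filter-by-length with a two-pass scheme: count password
-- multiplicities first, then build only the duplicate groups; same cost, different decomposition.

-- ===== PORT A =====
def detecter_doublons (comptes : List (List (String × String))) : List (String × List String) :=
  let groupes := comptes.foldl (fun g c =>
    match (PySem.Dict.mk c).get? "mdp", (PySem.Dict.mk c).get? "site" with
    | some mdp, some site =>
        if g.contains mdp then g.modify mdp [] (fun l => l ++ [site])   -- groupes_mdp[mdp].append(c['site'])
        else g.insert mdp [site]
    | _, _ => g)   -- KeyError: unreachable under Pre_
    PySem.Dict.empty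
  -- {mdp: sites for mdp, sites in groupes_mdp.items() if len(sites) > 1}
  ((groupes.items.filter (fun p => 1 < p.2.length)).foldl
    (fun d p => d.insert p.1 p.2) (PySem.Dict.empty : PySem.Dict String (List String))).items

-- ===== PORT B =====
def detecter_doublons_alt (comptes : List (List (String × String))) : List (String × List String) :=
  let counts : PySem.Dict String Int := comptes.foldl (fun d c =>
    ((PySem.Dict.mk c).get? "mdp").elim d   -- KeyError: unreachable under Pre_
      (fun mdp => d.insert mdp (d.getD mdp 0 + 1)))   -- counts[c['mdp']] = counts.get(c['mdp'], 0) + 1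
    PySem.Dict.empty
  let doublons := comptes.foldl (fun r c =>
    ((PySem.Dict.mk c).get? "mdp").elim r (fun mdp =>   -- KeyError: unreachable under Pre_
      ((PySem.Dict.mk c).get? "site").elim r (fun site =>
        -- counts[mdp]: mdp is always a key of counts here (inserted in pass 1), so it is getD
        if counts.getD mdp 0 > 1 then r.modify mdp [] (fun l => l ++ [site])   -- doublons.setdefault(mdp, []).append(c['site'])
        else r)))
    (PySem.Dict.empty : PySem.Dict String (List String))
  doublons.items

-- ===== PRECONDITION & SPEC =====
-- Pre_: every account dict has both keys 'mdp' and 'site' (otherwise A raises KeyError)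
def Pre_detecter_doublons (comptes : List (List (String × String))) : Prop :=
  (comptes.all (fun c => ((PySem.Dict.mk c).get? "mdp").isSome && ((PySem.Dict.mk c).get? "site").isSome)) = true
instance (comptes : List (List (String × String))) : Decidable (Pre_detecter_doublons comptes) := by unfold Pre_detecter_doublons; infer_instance
def pvWitness_detecter_doublons : (List (List (String × String))) :=
  [[("mdp","x"),("site","a")],[("mdp","y"),("site","b")],[("mdp","x"),("site","c")]]
def Spec_detecter_doublons (comptes : List (List (String × String))) (out : List (String × List String)) : Prop := out = detecter_doublons_alt comptes
instance (comptes : List (List (String × String))) (out : List (String × List String)) : Decidable (Spec_detecter_doublons comptes out) := by unfold Spec_detecter_doublons; infer_instance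

-- ===== CLAIM (what is proved, stated in full; the proofs are below) =====
def Claim_equal_detecter_doublons : Prop := ∀ (comptes : List (List (String × String))), Dom_detecter_doublons comptes → Pre_detecter_doublons comptes → Spec_detecter_doublons comptes (detecter_doublons comptes)

-- ===== LEMMAS AND PROOFS =====

-- the (password, site) pairs of the accounts, in order
def pvPairs (comptes : List (List (String × String))) : List (String × String) :=
  comptes.filterMap (fun c => ((PySem.Dict.mk c).get? "mdp").bind (fun k => ((PySem.Dict.mk c).get? "site").map (fun s => (k, s))))

-- A's grouping step is one dict.modify whether or not the key is present
theorem pv_modify_unconditional (g : PySem.Dict String (List String)) (mdp site : String) :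
    (if g.contains mdp then g.modify mdp [] (fun l => l ++ [site]) else g.insert mdp [site])
      = g.modify mdp [] (fun l => l ++ [site]) := by
  by_cases h : g.contains mdp = true
  · simp [h]
  · simp only [Bool.not_eq_true] at h
    rw [PySem.Dict.modify, PySem.Dict.getD_of_not_contains (h := h)]
    simp [h]

theorem pv_foldA_eq (comptes : List (List (String × String)))
    (h : ∀ c ∈ comptes, ((PySem.Dict.mk c).get? "mdp").isSome ∧ ((PySem.Dict.mk c).get? "site").isSome)
    (g : PySem.Dict String (List String)) :
    comptes.foldl (fun g c =>
      match (PySem.Dict.mk c).get? "mdp", (PySem.Dict.mk c).get? "site" with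
      | some mdp, some site =>
          if g.contains mdp then g.modify mdp [] (fun l => l ++ [site]) else g.insert mdp [site]
      | _, _ => g) g
    = (pvPairs comptes).foldl (fun d p => d.modify p.1 [] (fun l => l ++ [p.2])) g := by
  induction comptes generalizing g with
  | nil => rfl
  | cons c t ih =>
    obtain ⟨hk, hs⟩ := h c (List.mem_cons_self)
    obtain ⟨mdp, hm⟩ := Option.isSome_iff_exists.mp hk
    obtain ⟨site, hsi⟩ := Option.isSome_iff_exists.mp hs
    simp only [pvPairs, List.filterMap_cons, hm, hsi, Option.bind_some, Option.map_some,
      List.foldl_cons]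
    rw [pv_modify_unconditional]
    exact ih (fun c hc => h c (List.mem_cons_of_mem _ hc)) _

theorem pv_counts_eq (comptes : List (List (String × String)))
    (h : ∀ c ∈ comptes, ((PySem.Dict.mk c).get? "mdp").isSome ∧ ((PySem.Dict.mk c).get? "site").isSome)
    (d : PySem.Dict String Int) :
    comptes.foldl (fun d c =>
      ((PySem.Dict.mk c).get? "mdp").elim d
        (fun mdp => d.insert mdp (d.getD mdp 0 + 1))) d
    = ((pvPairs comptes).map Prod.fst).foldl (fun d x => d.insert x (d.getD x 0 + 1)) d := by
  induction comptes generalizing d with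
  | nil => rfl
  | cons c t ih =>
    obtain ⟨hk, hs⟩ := h c (List.mem_cons_self)
    obtain ⟨mdp, hm⟩ := Option.isSome_iff_exists.mp hk
    obtain ⟨site, hsi⟩ := Option.isSome_iff_exists.mp hs
    simp only [pvPairs, List.filterMap_cons, hm, hsi, Option.bind_some, Option.map_some,
      Option.elim_some, List.map_cons, List.foldl_cons]
    exact ih (fun c hc => h c (List.mem_cons_of_mem _ hc)) _

theorem pv_foldB_eq (comptes : List (List (String × String)))
    (h : ∀ c ∈ comptes, ((PySem.Dict.mk c).get? "mdp").isSome ∧ ((PySem.Dict.mk c).get? "site").isSome)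
    (counts : PySem.Dict String Int) (r : PySem.Dict String (List String)) :
    comptes.foldl (fun r c =>
      ((PySem.Dict.mk c).get? "mdp").elim r (fun mdp =>
        ((PySem.Dict.mk c).get? "site").elim r (fun site =>
          if counts.getD mdp 0 > 1 then r.modify mdp [] (fun l => l ++ [site]) else r))) r
    = (pvPairs comptes).foldl (fun r p =>
        if counts.getD p.1 0 > 1 then r.modify p.1 [] (fun l => l ++ [p.2]) else r) r := by
  induction comptes generalizing r with
  | nil => rfl
  | cons c t ih =>
    obtain ⟨hk, hs⟩ := h c (List.mem_cons_self)
    obtain ⟨mdp, hm⟩ := Option.isSome_iff_exists.mp hk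
    obtain ⟨site, hsi⟩ := Option.isSome_iff_exists.mp hs
    simp only [pvPairs, List.filterMap_cons, hm, hsi, Option.bind_some, Option.map_some,
      Option.elim_some, List.foldl_cons]
    exact ih (fun c hc => h c (List.mem_cons_of_mem _ hc)) _

theorem set_discard_filter (s : List String) (x : String) (q : String → Bool) :
    (PySem.Set.discard s x).filter q = PySem.Set.discard (s.filter q) x := by
  simp [PySem.Set.discard, List.filter_filter, Bool.and_comm]

theorem set_ofList_filter (l : List String) (q : String → Bool) :
    PySem.Set.ofList (l.filter q) = (PySem.Set.ofList l).filter q := by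
  induction l with
  | nil => rfl
  | cons x t ih =>
    by_cases hx : q x = true
    · rw [List.filter_cons_of_pos hx, PySem.Set.ofList_cons, PySem.Set.ofList_cons, ih,
        List.filter_cons_of_pos hx, set_discard_filter]
    · rw [List.filter_cons_of_neg (by simp_all), PySem.Set.ofList_cons, ih,
        List.filter_cons_of_neg (by simp_all), set_discard_filter]
      simp only [PySem.Set.discard, List.filter_filter]
      apply List.filter_congr
      intro a _
      by_cases h2 : a = x
      · subst h2; simp [hx]
      · simp [h2]

-- items of the grouping fold: first-occurrence key order, sites in list order
theorem pv_items_group (pairs : List (String × String)) :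
    (pairs.foldl (fun d p => d.modify p.1 [] (fun l => l ++ [p.2])) PySem.Dict.empty).items
    = (PySem.Set.ofList (pairs.map Prod.fst)).map
        (fun k => (k, (pairs.filter (fun p => p.1 == k)).map Prod.snd)) := by
  have hnd : (pairs.foldl (fun d p => d.modify p.1 [] (fun l => l ++ [p.2])) PySem.Dict.empty).keys.Nodup :=
    PySem.Dict.nodup_keys_foldl_modify_key pairs Prod.fst [] (fun _ x => fun l => l ++ [x.2]) _
      PySem.Dict.nodup_keys_empty
  rw [PySem.Dict.items_eq_map_keys _ hnd []]
  rw [PySem.Dict.keys_foldl_modify_key (key := Prod.fst)]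
  rw [PySem.Dict.keys_empty, PySem.Set.update_nil_left]
  apply List.map_congr_left
  intro k hk
  rw [PySem.Dict.getD_foldl_modify_append, PySem.Dict.getD_empty]
  simp

theorem pv_count_countP (pairs : List (String × String)) (k : String) :
    (pairs.map Prod.fst).count k = pairs.countP (fun p => p.1 == k) := by
  rw [List.count, List.countP_map]; rfl

theorem pv_items_ofPairs (l : List (String × List String)) (hnd : (l.map Prod.fst).Nodup) :
    (l.foldl (fun d p => d.insert p.1 p.2) (PySem.Dict.empty : PySem.Dict String (List String))).items = l := by
  rw [PySem.Dict.items_foldl_insert_fresh l Prod.fst Prod.snd PySem.Dict.empty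
    (fun a _ => PySem.Dict.contains_empty _) hnd]
  have : (PySem.Dict.empty : PySem.Dict String (List String)).items = [] := rfl
  simp [this]

-- ===== VERDICT (by name: the statement is the Claim_ definition above) =====
theorem detecter_doublons_spec : Claim_equal_detecter_doublons := by
  intro comptes _ hpre
  have h : ∀ c ∈ comptes, ((PySem.Dict.mk c).get? "mdp").isSome ∧ ((PySem.Dict.mk c).get? "site").isSome := by
    intro c hc
    have := List.all_eq_true.mp hpre c hc
    simpa using this
  unfold Spec_detecter_doublons detecter_doublons detecter_doublons_alt
  simp only []
  rw [pv_foldA_eq comptes h, pv_counts_eq comptes h, pv_foldB_eq comptes h]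
  set pairs := pvPairs comptes with hpairs
  set K : List String := pairs.map Prod.fst with hK
  -- resolve counts lookups to multiplicities
  simp only [PySem.Dict.getD_foldl_insert_add_one, PySem.Dict.getD_empty, zero_add]
  -- B's guarded loop is a loop over the filtered pairs
  rw [PySem.List.foldl_ite_eq_foldl_filter
    (p := fun (p : String × String) => ((K.count p.1 : Int) > 1))]
  rw [pv_items_group, pv_items_group]
  -- A's dict comprehension: fresh distinct keys, so its items are the filtered items
  rw [List.filter_map]
  have hndS : ((((PySem.Set.ofList (List.map Prod.fst pairs)).filter
      ((fun (p : String × List String) => decide (1 < p.2.length)) ∘ fun k =>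
        (k, List.map Prod.snd (List.filter (fun p => p.1 == k) pairs)))).map
      (fun k => (k, List.map Prod.snd (List.filter (fun p => p.1 == k) pairs)))).map Prod.fst).Nodup := by
    simp only [List.map_map]
    have hid : (Prod.fst ∘ fun k : String =>
        (k, List.map Prod.snd (List.filter (fun p => p.1 == k) pairs))) = id := rfl
    rw [hid, List.map_id]
    exact (PySem.Set.nodup_ofList (pairs.map Prod.fst)).filter _
  rw [pv_items_ofPairs _ hndS]
  -- the length-of-group test is the multiplicity test
  have hpred : ∀ k : String, ((fun (p : String × List String) => decide (1 < p.2.length)) ∘ (fun k =>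
      (k, List.map Prod.snd (List.filter (fun p => p.1 == k) pairs)))) k
      = decide ((K.count k : Int) > 1) := by
    intro k
    simp only [Function.comp, List.length_map]
    rw [decide_eq_decide, ← List.countP_eq_length_filter, ← pv_count_countP, hK]
    omega
  rw [List.filter_congr (fun k _ => hpred k)]
  -- the duplicate passwords, deduplicated in first-occurrence order, on both sides
  have e1 : K.filter (fun k => decide ((K.count k : Int) > 1))
      = (pairs.filter (fun p => decide ((K.count p.1 : Int) > 1))).map Prod.fst := by
    rw [hK, List.filter_map]; rfl
  rw [← e1, set_ofList_filter]
  apply List.map_congr_left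
  intro k hk
  have hq : decide ((K.count k : Int) > 1) = true := (List.mem_filter.mp hk).2
  have heq : List.filter (fun p => p.1 == k)
      (List.filter (fun x => decide ((K.count x.1 : Int) > 1)) pairs)
      = List.filter (fun p => p.1 == k) pairs := by
    rw [List.filter_filter]
    apply List.filter_congr
    intro p _
    by_cases hpk : p.1 = k
    · subst hpk
      have hc := of_decide_eq_true hq
      simp
      omega
    · simp [hpk]
  rw [heq]
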